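-- pv_equiv track=rewrite | github.com/School-Library-Project/Application | qr_code_Q.py | dop_stroki
-- ===== SOURCE A (Python) =====
-- def dop_stroki(string,size,t):
--     if (len(string)%8!=0 and t==0):
--         while len(string)%8!=0:
--             string+="0"
--     if (len(string)<size and t==1):
--         for i in range((size-len(string))//8):
--             if (i%2==0):
--                 string += "11101100"
--             if (i%2==1):
--                 string += "00010001"
--     return string
-- ===== SOURCE B (Python) =====
-- def dop_stroki(string, size, t):
--     if t == 0:
--         string += "0" * (-len(string) % 8)
--     elif t == 1 and len(string) < size:
--         n = (size - len(string)) // 8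
--         string += ("1110110000010001" * (n // 2 + 1))[:n * 8]
--     return string
-- ===== Notes on version B (the rewrite author's own statement) =====
-- stated objective: simpler
-- what changed: Replaces the byte-at-a-time while/for append loops with closed-form bulk operations: zero-pad of length -len%8 built in one step, and the alternating pad built by repeating the 16-char two-byte pattern and slicing it to exactly n*8 characters.
import Mathlib
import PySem

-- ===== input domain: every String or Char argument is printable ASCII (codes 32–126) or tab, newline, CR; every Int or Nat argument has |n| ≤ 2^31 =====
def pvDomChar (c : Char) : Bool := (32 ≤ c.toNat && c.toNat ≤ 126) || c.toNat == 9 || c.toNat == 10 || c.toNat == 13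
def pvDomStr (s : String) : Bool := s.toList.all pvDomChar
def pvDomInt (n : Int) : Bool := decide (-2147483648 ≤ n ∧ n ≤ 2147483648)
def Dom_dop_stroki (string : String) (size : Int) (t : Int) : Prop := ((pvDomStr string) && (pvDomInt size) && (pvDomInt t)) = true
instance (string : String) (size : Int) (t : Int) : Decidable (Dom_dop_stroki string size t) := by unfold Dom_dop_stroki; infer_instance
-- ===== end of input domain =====

-- B builds each pad in bulk (closed-form zero pad of length -len%8; the alternating pad by
-- repeating the 16-char two-byte pattern and slicing to n*8 chars) instead of A's
-- byte-at-a-time while/for append loops.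

-- ===== PORT A =====
-- the 'while len(string) % 8 != 0: string += "0"' loop of A; the fuel only totalises it
-- (8 suffices: each step raises len % 8 towards 0, so at most 7 iterations run)
def pvPadWhile : Nat → List Char → List Char
  | 0, s => s
  | fuel + 1, s => if s.length % 8 ≠ 0 then pvPadWhile fuel (s ++ ['0']) else s

def dop_stroki (string : String) (size : Int) (t : Int) : String :=
  let s := string.toList
  let s := if s.length % 8 ≠ 0 ∧ t = 0 then pvPadWhile 8 s else s
  let s :=
    if (s.length : Int) < size ∧ t = 1 then
      (PySem.List.pyRange 0 (PySem.Int.floordiv (size - (s.length : Int)) 8) 1).foldl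
        (fun acc i =>
          let acc := if PySem.Int.mod i 2 = 0 then acc ++ "11101100".toList else acc
          let acc := if PySem.Int.mod i 2 = 1 then acc ++ "00010001".toList else acc
          acc) s
    else s
  String.ofList s

-- ===== PORT B =====
def dop_stroki_alt (string : String) (size : Int) (t : Int) : String :=
  let s := string.toList
  if t = 0 then
    String.ofList (s ++ List.replicate (PySem.Int.mod (-(s.length : Int)) 8).toNat '0')
  else if t = 1 ∧ (s.length : Int) < size then
    let n := PySem.Int.floordiv (size - (s.length : Int)) 8
    String.ofList (s ++ (List.replicate (n.toNat / 2 + 1) "1110110000010001".toList).flatten.take (n.toNat * 8))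
  else
    String.ofList s

-- ===== PRECONDITION & SPEC =====
def Spec_dop_stroki (string : String) (size : Int) (t : Int) (out : String) : Prop := out = dop_stroki_alt string size t
instance (string : String) (size : Int) (t : Int) (out : String) : Decidable (Spec_dop_stroki string size t out) := by unfold Spec_dop_stroki; infer_instance

-- ===== CLAIM (what is proved, stated in full; the proofs are below) =====
def Claim_equal_dop_stroki : Prop := ∀ (string : String) (size : Int) (t : Int), Dom_dop_stroki string size t → Spec_dop_stroki string size t (dop_stroki string size t)

-- ===== LEMMAS AND PROOFS =====

-- A's while loop appends exactly (8 - len % 8) % 8 zeros (any sufficient fuel)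
theorem pvPadWhile_eq (fuel : Nat) : ∀ s : List Char, (8 - s.length % 8) % 8 ≤ fuel →
    pvPadWhile fuel s = s ++ List.replicate ((8 - s.length % 8) % 8) '0' := by
  induction fuel with
  | zero =>
      intro s hf
      have h0 : (8 - s.length % 8) % 8 = 0 := by omega
      have h : s.length % 8 = 0 := by omega
      simp [pvPadWhile, h0]
  | succ fuel ih =>
      intro s hf
      rw [pvPadWhile]
      by_cases h : s.length % 8 = 0
      · rw [if_neg (by omega)]
        have h0 : (8 - s.length % 8) % 8 = 0 := by omega
        simp [h0]
      · rw [if_pos h]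
        have h8 : s.length % 8 < 8 := Nat.mod_lt _ (by omega)
        have hlen : (s ++ ['0']).length % 8 = (s.length % 8 + 1) % 8 := by
          simp [List.length_append, Nat.add_mod]
        rw [ih (s ++ ['0']) (by rw [hlen]; omega), hlen]
        rcases Nat.lt_or_ge (s.length % 8) 7 with h7 | h7
        · have e2 : (s.length % 8 + 1) % 8 = s.length % 8 + 1 := by omega
          have e1 : (8 - s.length % 8) % 8 = (8 - (s.length % 8 + 1)) % 8 + 1 := by omega
          rw [e2, e1, List.append_assoc]
          congr 1
        · have hl : s.length % 8 = 7 := by omega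
          rw [hl]
          simp

-- the byte appended for loop index k, by parity
def pvBlock (k : Nat) : List Char :=
  if k % 2 = 0 then "11101100".toList else "00010001".toList

theorem pvBlock_add_two (k : Nat) : pvBlock (k + 2) = pvBlock k := by
  simp [pvBlock]

theorem pvRange_two_shift (k : Nat) :
    (List.range (k + 2)).flatMap pvBlock =
      "1110110000010001".toList ++ (List.range k).flatMap pvBlock := by
  rw [List.range_succ_eq_map, List.range_succ_eq_map]
  have h2 : ∀ a, pvBlock (a + 1 + 1) = pvBlock a := fun a => pvBlock_add_two a
  simp only [List.flatMap_cons, List.flatMap_map, h2]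
  rw [← List.append_assoc]
  congr 1

-- B's sliced repetition of the 16-char pattern is A's concatenation of nn alternating bytes
theorem pvTake_flatten (nn : Nat) : ∀ m, nn ≤ 2 * m →
    ((List.replicate m "1110110000010001".toList).flatten.take (nn * 8)) =
      (List.range nn).flatMap pvBlock := by
  induction nn using Nat.strong_induction_on with
  | _ nn ih =>
    intro m hm
    match nn, m with
    | 0, m => simp
    | 1, m+1 =>
        rw [List.replicate_succ, List.flatten_cons, List.take_append]
        simp [List.range_succ, pvBlock]
    | (k+2), m+1 =>
        have IH := ih k (by omega) m (by omega)
        rw [List.replicate_succ, List.flatten_cons, List.take_append]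
        have hlen : ("1110110000010001".toList).length = 16 := by rfl
        rw [pvRange_two_shift, ← IH]
        congr 1
        · rw [List.take_of_length_le (by rw [hlen]; omega)]
        · congr 1
          rw [hlen]; omega

-- A's t == 0 branch equals B's closed-form zero pad
theorem padA_eq_padB (s : List Char) :
    (if s.length % 8 ≠ 0 then pvPadWhile 8 s else s)
      = s ++ List.replicate (PySem.Int.mod (-(s.length : Int)) 8).toNat '0' := by
  have hm : PySem.Int.mod (-(s.length : Int)) 8 = (-(s.length : Int)) % 8 :=
    PySem.Int.mod_eq_emod_of_pos (by omega)
  by_cases h : s.length % 8 = 0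
  · have h0 : (PySem.Int.mod (-(s.length : Int)) 8).toNat = 0 := by rw [hm]; omega
    rw [if_neg (by omega), h0]
    simp
  · rw [if_pos h, pvPadWhile_eq 8 s (by omega)]
    congr 2
    rw [hm]; omega

-- A's for loop appends the alternating bytes pvBlock 0 … pvBlock (n-1)
theorem foldA_eq (s : List Char) (n : Int) :
    (PySem.List.pyRange 0 n 1).foldl
      (fun acc i =>
        let acc := if PySem.Int.mod i 2 = 0 then acc ++ "11101100".toList else acc
        let acc := if PySem.Int.mod i 2 = 1 then acc ++ "00010001".toList else acc
        acc) s
    = s ++ (List.range n.toNat).flatMap pvBlock := by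
  have hb : (fun (acc : List Char) (i : Int) =>
        let acc := if PySem.Int.mod i 2 = 0 then acc ++ "11101100".toList else acc
        let acc := if PySem.Int.mod i 2 = 1 then acc ++ "00010001".toList else acc
        acc)
      = fun acc i => acc ++ (if PySem.Int.mod i 2 = 0 then "11101100".toList else "00010001".toList) := by
    funext acc i
    have h0 : 0 ≤ PySem.Int.mod i 2 := PySem.Int.mod_nonneg _ (by omega)
    have h1 : PySem.Int.mod i 2 < 2 := PySem.Int.mod_lt _ (by omega)
    dsimp only
    by_cases h : PySem.Int.mod i 2 = 0
    · rw [if_pos h, if_neg (by omega), if_pos h]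
    · rw [if_neg h, if_pos (by omega), if_neg h]
  rw [hb, PySem.List.foldl_append_eq_flatMap]
  congr 1
  rw [PySem.List.pyRange_one, List.flatMap_map, Int.sub_zero]
  have hfun : (fun k : Nat =>
        (fun i : Int => if PySem.Int.mod i 2 = 0 then "11101100".toList else "00010001".toList)
          ((0 : Int) + (k : Int))) = pvBlock := by
    funext k
    have hmc : PySem.Int.mod ((k : Int)) 2 = ((k % 2 : Nat) : Int) := PySem.Int.mod_natCast k 2
    dsimp only
    rw [zero_add, hmc]
    by_cases hk : k % 2 = 0
    · rw [if_pos (by exact_mod_cast hk)]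
      unfold pvBlock
      rw [if_pos hk]
    · rw [if_neg (by omega)]
      unfold pvBlock
      rw [if_neg hk]
  exact congrArg (List.flatMap · (List.range n.toNat)) hfun

theorem dop_stroki_eq (string : String) (size t : Int) :
    dop_stroki string size t = dop_stroki_alt string size t := by
  simp only [dop_stroki, dop_stroki_alt]
  by_cases ht0 : t = 0
  · subst ht0
    rw [if_pos rfl]
    rw [if_neg (show ¬(_ ∧ (0 : Int) = 1) from fun h => by exact absurd h.2 (by norm_num))]
    have hc : (string.toList.length % 8 ≠ 0 ∧ (0 : Int) = 0) ↔ string.toList.length % 8 ≠ 0 := by simp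
    rw [if_congr hc rfl rfl, padA_eq_padB]
  · by_cases ht1 : t = 1
    · subst ht1
      rw [if_neg (show ¬(string.toList.length % 8 ≠ 0 ∧ (1 : Int) = 0) from fun h => by exact absurd h.2 (by norm_num))]
      by_cases hlt : (string.toList.length : Int) < size
      · rw [if_pos (And.intro hlt rfl), if_neg ht0, if_pos (And.intro rfl hlt),
          foldA_eq, pvTake_flatten _ _ (by omega)]
      · rw [if_neg (fun h => hlt h.1), if_neg ht0, if_neg (fun h => hlt h.2)]
    · rw [if_neg (fun h => ht1 h.2), if_neg (fun h => ht0 h.2), if_neg ht0,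
        if_neg (fun h => ht1 h.1)]

-- ===== VERDICT (by name: the statement is the Claim_ definition above) =====
theorem dop_stroki_spec : Claim_equal_dop_stroki := by
  intro string size t _
  exact dop_stroki_eq string size t
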